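-- pv_equiv track=rewrite | github.com/ben-truong-0324/text_to_diag | src/nmf4h.py | get_multigroup_label
-- ===== SOURCE A (Python) =====
-- target_label_code_groups = {
--     1: [1, 139, "Infectious and Parasitic Diseases"],
--     2: [140, 239, "Neoplasms"],
--     3: [240, 279, "Endocrine, Nutritional, Metabolic, Immunity"],
--     4: [280, 289, "Blood and Blood-Forming Organs"],
--     5: [290, 319, "Mental Disorders"],
--     6: [320, 389, "Nervous System and Sense Organs"],
--     7: [390, 459, "Circulatory System"],
--     8: [460, 519, "Respiratory System"],
--     9: [520, 579, "Digestive System"],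
--     10: [580, 629, "Genitourinary System"],
--     11: [630, 677, "Pregnancy, Childbirth, and the Puerperium"],
--     12: [680, 709, "Skin and Subcutaneous Tissue"],
--     13: [710, 739, "Musculoskeletal System and Connective Tissue"],
--     14: [740, 759, "Congenital Anomalies"],
--     15: [780, 789, "Symptoms"],
--     16: [790, 796, "Nonspecific Abnormal Findings"],
--     17: [797, 799, "Ill-defined and Unknown Causes of Morbidity and Mortality"],
--     18: [800, 999, "Injury and Poisoning"],
--     # 19: [0, 0, "Reference or Supplemental V-Codes"]
-- }
--
-- def get_multigroup_label(icd_code):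
--     """
--     return None for: cannot get first 3 numbers (null value) OR number does not match any groups (invalid code)
--     """
--     # if letter, return group 19 as they start with letter
--     if isinstance(icd_code, str) and icd_code[0].isalpha():
--         return 19
--     try:
--         code_num = int(str(icd_code)[:3])  # Extract first 3 characters as an integer
--     except ValueError:
--         return None  # Return None if conversion fails
--     # Iterate through each group in target_label_code_groups to find the correct range
--     for label, (start, end, description) in target_label_code_groups.items():
--         if isinstance(start, int) and code_num in range(start, end + 1):  # +1 to include the end value
--             return label
--     return None
-- ===== SOURCE B (Python) =====
-- import bisect
--
-- _STARTS = [1, 140, 240, 280, 290, 320, 390, 460, 520, 580, 630, 680, 710, 740, 780, 790, 797, 800]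
-- _ENDS   = [139, 239, 279, 289, 319, 389, 459, 519, 579, 629, 677, 709, 739, 759, 789, 796, 799, 999]
--
-- def get_multigroup_label(icd_code):
--     s = str(icd_code)
--     if s[:1].isalpha():
--         return 19
--     try:
--         n = int(s[:3])
--     except ValueError:
--         return None
--     i = bisect.bisect_right(_STARTS, n) - 1
--     if i >= 0 and n <= _ENDS[i]:
--         return i + 1
--     return None
-- ===== Notes on version B (the rewrite author's own statement) =====
-- stated objective: idiomatic
-- what changed: Replaced the per-call linear scan over the 18-entry group dict with a precomputed sorted array of range starts probed once by bisect.bisect_right, then a single end-bound check.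
import Mathlib
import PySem

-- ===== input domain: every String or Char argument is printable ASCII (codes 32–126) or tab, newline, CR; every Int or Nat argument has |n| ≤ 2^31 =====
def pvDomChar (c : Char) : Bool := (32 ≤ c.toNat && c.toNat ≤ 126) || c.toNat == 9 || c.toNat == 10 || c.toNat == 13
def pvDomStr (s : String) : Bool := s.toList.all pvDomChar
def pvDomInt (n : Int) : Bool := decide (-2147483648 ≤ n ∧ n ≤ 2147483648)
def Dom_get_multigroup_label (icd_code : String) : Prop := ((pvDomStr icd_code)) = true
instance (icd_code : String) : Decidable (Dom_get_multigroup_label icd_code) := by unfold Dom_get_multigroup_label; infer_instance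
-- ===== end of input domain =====

-- ===== PORT A =====
-- B replaces A's linear scan over the group dict with a sorted-starts array probed by
-- one bisect_right; return values proved equal on all non-empty strings (Pre_), same cost class.
-- the module dict target_label_code_groups, in insertion order: (label, start, end, description)
def pvGroups : List (Int × Int × Int × String) :=
  [(1, 1, 139, "Infectious and Parasitic Diseases"),
   (2, 140, 239, "Neoplasms"),
   (3, 240, 279, "Endocrine, Nutritional, Metabolic, Immunity"),
   (4, 280, 289, "Blood and Blood-Forming Organs"),
   (5, 290, 319, "Mental Disorders"),
   (6, 320, 389, "Nervous System and Sense Organs"),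
   (7, 390, 459, "Circulatory System"),
   (8, 460, 519, "Respiratory System"),
   (9, 520, 579, "Digestive System"),
   (10, 580, 629, "Genitourinary System"),
   (11, 630, 677, "Pregnancy, Childbirth, and the Puerperium"),
   (12, 680, 709, "Skin and Subcutaneous Tissue"),
   (13, 710, 739, "Musculoskeletal System and Connective Tissue"),
   (14, 740, 759, "Congenital Anomalies"),
   (15, 780, 789, "Symptoms"),
   (16, 790, 796, "Nonspecific Abnormal Findings"),
   (17, 797, 799, "Ill-defined and Unknown Causes of Morbidity and Mortality"),
   (18, 800, 999, "Injury and Poisoning")]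

-- the for-loop with early return: first group whose range contains n
-- (isinstance(start, int) is True for every entry; 'n in range(start, end+1)' is start ≤ n < end+1)
def pvScanGroups (gs : List (Int × Int × Int × String)) (n : Int) : Option Int :=
  match gs with
  | [] => none
  | (label, s, e, _) :: rest =>
      if s ≤ n ∧ n < e + 1 then some label else pvScanGroups rest n

def get_multigroup_label (icd_code : String) : Option Int :=
  match PySem.Str.pyGet? icd_code 0 with
  | none => none   -- icd_code[0] raises IndexError: excluded by Pre_
  | some c =>
    if PySem.Chars.isalpha c then some 19
    else
      match PySem.Int.ofStr? (PySem.Str.slice icd_code none (some 3)) with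
      | none => none
      | some code_num => pvScanGroups pvGroups code_num

-- ===== PORT B =====
def pvStarts : List Int := [1, 140, 240, 280, 290, 320, 390, 460, 520, 580, 630, 680, 710, 740, 780, 790, 797, 800]
def pvEnds : List Int := [139, 239, 279, 289, 319, 389, 459, 519, 579, 629, 677, 709, 739, 759, 789, 796, 799, 999]

def get_multigroup_label_alt (icd_code : String) : Option Int :=
  if PySem.Str.strIsalpha (PySem.Str.slice icd_code none (some 1)) then some 19
  else
    match PySem.Int.ofStr? (PySem.Str.slice icd_code none (some 3)) with
    | none => none
    | some n =>
      let i : Int := (PySem.List.bisectRight pvStarts n : Int) - 1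
      if 0 ≤ i ∧ n ≤ PySem.List.pyGetD pvEnds i 0 then some (i + 1) else none

-- ===== PRECONDITION & SPEC =====
-- Pre_ excludes only the empty string, on which A's icd_code[0] raises IndexError.
def Pre_get_multigroup_label (icd_code : String) : Prop := icd_code ≠ ""
instance (icd_code : String) : Decidable (Pre_get_multigroup_label icd_code) := by
  unfold Pre_get_multigroup_label; infer_instance
def pvWitness_get_multigroup_label : String := "250"

def Spec_get_multigroup_label (icd_code : String) (out : Option Int) : Prop := out = get_multigroup_label_alt icd_code
instance (icd_code : String) (out : Option Int) : Decidable (Spec_get_multigroup_label icd_code out) := by unfold Spec_get_multigroup_label; infer_instance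

-- ===== CLAIM (what is proved, stated in full; the proofs are below) =====
def Claim_equal_get_multigroup_label : Prop := ∀ (icd_code : String), Dom_get_multigroup_label icd_code → Pre_get_multigroup_label icd_code → Spec_get_multigroup_label icd_code (get_multigroup_label icd_code)

-- ===== LEMMAS AND PROOFS =====
-- the linear scan over the 18 groups equals the bisect probe, for every code number
set_option maxHeartbeats 1000000 in
theorem pvScan_eq_probe (n : Int) :
    pvScanGroups pvGroups n =
      (let i : Int := (PySem.List.bisectRight pvStarts n : Int) - 1;
       if 0 ≤ i ∧ n ≤ PySem.List.pyGetD pvEnds i 0 then some (i + 1) else none) := by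
  obtain ⟨hle, hA, hB⟩ := PySem.List.bisectRight_spec pvStarts n (by decide)
  set k := PySem.List.bisectRight pvStarts n with hk
  have hk18 : k ≤ 18 := by simpa [pvStarts] using hle
  clear hle hk
  interval_cases k
  · have hhi : n < (1:Int) := by have := hB 0 (by decide) (by decide); simpa [pvStarts] using this
    norm_num [pvScanGroups, pvGroups]
    rw [if_neg (by omega), if_neg (by omega), if_neg (by omega), if_neg (by omega), if_neg (by omega), if_neg (by omega), if_neg (by omega), if_neg (by omega), if_neg (by omega), if_neg (by omega), if_neg (by omega), if_neg (by omega), if_neg (by omega), if_neg (by omega), if_neg (by omega), if_neg (by omega), if_neg (by omega), if_neg (by omega)]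
  · have hlo : (1:Int) ≤ n := by have := hA 0 (by decide) (by decide); simpa [pvStarts] using this
    have hhi : n < (140:Int) := by have := hB 1 (by decide) (by decide); simpa [pvStarts] using this
    norm_num [pvScanGroups, pvGroups]
    rw [show PySem.List.pyGetD pvEnds 0 0 = (139:Int) from by decide]
    rw [if_pos (by omega), if_pos (by omega)]
  · have hlo : (140:Int) ≤ n := by have := hA 1 (by decide) (by decide); simpa [pvStarts] using this
    have hhi : n < (240:Int) := by have := hB 2 (by decide) (by decide); simpa [pvStarts] using this
    norm_num [pvScanGroups, pvGroups]
    rw [show PySem.List.pyGetD pvEnds 1 0 = (239:Int) from by decide]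
    rw [if_neg (by omega), if_pos (by omega), if_pos (by omega)]
  · have hlo : (240:Int) ≤ n := by have := hA 2 (by decide) (by decide); simpa [pvStarts] using this
    have hhi : n < (280:Int) := by have := hB 3 (by decide) (by decide); simpa [pvStarts] using this
    norm_num [pvScanGroups, pvGroups]
    rw [show PySem.List.pyGetD pvEnds 2 0 = (279:Int) from by decide]
    rw [if_neg (by omega), if_neg (by omega), if_pos (by omega), if_pos (by omega)]
  · have hlo : (280:Int) ≤ n := by have := hA 3 (by decide) (by decide); simpa [pvStarts] using this
    have hhi : n < (290:Int) := by have := hB 4 (by decide) (by decide); simpa [pvStarts] using this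
    norm_num [pvScanGroups, pvGroups]
    rw [show PySem.List.pyGetD pvEnds 3 0 = (289:Int) from by decide]
    rw [if_neg (by omega), if_neg (by omega), if_neg (by omega), if_pos (by omega), if_pos (by omega)]
  · have hlo : (290:Int) ≤ n := by have := hA 4 (by decide) (by decide); simpa [pvStarts] using this
    have hhi : n < (320:Int) := by have := hB 5 (by decide) (by decide); simpa [pvStarts] using this
    norm_num [pvScanGroups, pvGroups]
    rw [show PySem.List.pyGetD pvEnds 4 0 = (319:Int) from by decide]
    rw [if_neg (by omega), if_neg (by omega), if_neg (by omega), if_neg (by omega), if_pos (by omega), if_pos (by omega)]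
  · have hlo : (320:Int) ≤ n := by have := hA 5 (by decide) (by decide); simpa [pvStarts] using this
    have hhi : n < (390:Int) := by have := hB 6 (by decide) (by decide); simpa [pvStarts] using this
    norm_num [pvScanGroups, pvGroups]
    rw [show PySem.List.pyGetD pvEnds 5 0 = (389:Int) from by decide]
    rw [if_neg (by omega), if_neg (by omega), if_neg (by omega), if_neg (by omega), if_neg (by omega), if_pos (by omega), if_pos (by omega)]
  · have hlo : (390:Int) ≤ n := by have := hA 6 (by decide) (by decide); simpa [pvStarts] using this
    have hhi : n < (460:Int) := by have := hB 7 (by decide) (by decide); simpa [pvStarts] using this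
    norm_num [pvScanGroups, pvGroups]
    rw [show PySem.List.pyGetD pvEnds 6 0 = (459:Int) from by decide]
    rw [if_neg (by omega), if_neg (by omega), if_neg (by omega), if_neg (by omega), if_neg (by omega), if_neg (by omega), if_pos (by omega), if_pos (by omega)]
  · have hlo : (460:Int) ≤ n := by have := hA 7 (by decide) (by decide); simpa [pvStarts] using this
    have hhi : n < (520:Int) := by have := hB 8 (by decide) (by decide); simpa [pvStarts] using this
    norm_num [pvScanGroups, pvGroups]
    rw [show PySem.List.pyGetD pvEnds 7 0 = (519:Int) from by decide]
    rw [if_neg (by omega), if_neg (by omega), if_neg (by omega), if_neg (by omega), if_neg (by omega), if_neg (by omega), if_neg (by omega), if_pos (by omega), if_pos (by omega)]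
  · have hlo : (520:Int) ≤ n := by have := hA 8 (by decide) (by decide); simpa [pvStarts] using this
    have hhi : n < (580:Int) := by have := hB 9 (by decide) (by decide); simpa [pvStarts] using this
    norm_num [pvScanGroups, pvGroups]
    rw [show PySem.List.pyGetD pvEnds 8 0 = (579:Int) from by decide]
    rw [if_neg (by omega), if_neg (by omega), if_neg (by omega), if_neg (by omega), if_neg (by omega), if_neg (by omega), if_neg (by omega), if_neg (by omega), if_pos (by omega), if_pos (by omega)]
  · have hlo : (580:Int) ≤ n := by have := hA 9 (by decide) (by decide); simpa [pvStarts] using this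
    have hhi : n < (630:Int) := by have := hB 10 (by decide) (by decide); simpa [pvStarts] using this
    norm_num [pvScanGroups, pvGroups]
    rw [show PySem.List.pyGetD pvEnds 9 0 = (629:Int) from by decide]
    rw [if_neg (by omega), if_neg (by omega), if_neg (by omega), if_neg (by omega), if_neg (by omega), if_neg (by omega), if_neg (by omega), if_neg (by omega), if_neg (by omega), if_pos (by omega), if_pos (by omega)]
  · have hlo : (630:Int) ≤ n := by have := hA 10 (by decide) (by decide); simpa [pvStarts] using this
    have hhi : n < (680:Int) := by have := hB 11 (by decide) (by decide); simpa [pvStarts] using this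
    norm_num [pvScanGroups, pvGroups]
    rw [show PySem.List.pyGetD pvEnds 10 0 = (677:Int) from by decide]
    by_cases hc : n ≤ (677:Int)
    · rw [if_neg (by omega), if_neg (by omega), if_neg (by omega), if_neg (by omega), if_neg (by omega), if_neg (by omega), if_neg (by omega), if_neg (by omega), if_neg (by omega), if_neg (by omega), if_pos (by omega), if_pos hc]
    · rw [if_neg (by omega), if_neg (by omega), if_neg (by omega), if_neg (by omega), if_neg (by omega), if_neg (by omega), if_neg (by omega), if_neg (by omega), if_neg (by omega), if_neg (by omega), if_neg (by omega), if_neg (by omega), if_neg (by omega), if_neg (by omega), if_neg (by omega), if_neg (by omega), if_neg (by omega), if_neg (by omega), if_neg hc]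
  · have hlo : (680:Int) ≤ n := by have := hA 11 (by decide) (by decide); simpa [pvStarts] using this
    have hhi : n < (710:Int) := by have := hB 12 (by decide) (by decide); simpa [pvStarts] using this
    norm_num [pvScanGroups, pvGroups]
    rw [show PySem.List.pyGetD pvEnds 11 0 = (709:Int) from by decide]
    rw [if_neg (by omega), if_neg (by omega), if_neg (by omega), if_neg (by omega), if_neg (by omega), if_neg (by omega), if_neg (by omega), if_neg (by omega), if_neg (by omega), if_neg (by omega), if_neg (by omega), if_pos (by omega), if_pos (by omega)]
  · have hlo : (710:Int) ≤ n := by have := hA 12 (by decide) (by decide); simpa [pvStarts] using this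
    have hhi : n < (740:Int) := by have := hB 13 (by decide) (by decide); simpa [pvStarts] using this
    norm_num [pvScanGroups, pvGroups]
    rw [show PySem.List.pyGetD pvEnds 12 0 = (739:Int) from by decide]
    rw [if_neg (by omega), if_neg (by omega), if_neg (by omega), if_neg (by omega), if_neg (by omega), if_neg (by omega), if_neg (by omega), if_neg (by omega), if_neg (by omega), if_neg (by omega), if_neg (by omega), if_neg (by omega), if_pos (by omega), if_pos (by omega)]
  · have hlo : (740:Int) ≤ n := by have := hA 13 (by decide) (by decide); simpa [pvStarts] using this
    have hhi : n < (780:Int) := by have := hB 14 (by decide) (by decide); simpa [pvStarts] using this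
    norm_num [pvScanGroups, pvGroups]
    rw [show PySem.List.pyGetD pvEnds 13 0 = (759:Int) from by decide]
    by_cases hc : n ≤ (759:Int)
    · rw [if_neg (by omega), if_neg (by omega), if_neg (by omega), if_neg (by omega), if_neg (by omega), if_neg (by omega), if_neg (by omega), if_neg (by omega), if_neg (by omega), if_neg (by omega), if_neg (by omega), if_neg (by omega), if_neg (by omega), if_pos (by omega), if_pos hc]
    · rw [if_neg (by omega), if_neg (by omega), if_neg (by omega), if_neg (by omega), if_neg (by omega), if_neg (by omega), if_neg (by omega), if_neg (by omega), if_neg (by omega), if_neg (by omega), if_neg (by omega), if_neg (by omega), if_neg (by omega), if_neg (by omega), if_neg (by omega), if_neg (by omega), if_neg (by omega), if_neg (by omega), if_neg hc]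
  · have hlo : (780:Int) ≤ n := by have := hA 14 (by decide) (by decide); simpa [pvStarts] using this
    have hhi : n < (790:Int) := by have := hB 15 (by decide) (by decide); simpa [pvStarts] using this
    norm_num [pvScanGroups, pvGroups]
    rw [show PySem.List.pyGetD pvEnds 14 0 = (789:Int) from by decide]
    rw [if_neg (by omega), if_neg (by omega), if_neg (by omega), if_neg (by omega), if_neg (by omega), if_neg (by omega), if_neg (by omega), if_neg (by omega), if_neg (by omega), if_neg (by omega), if_neg (by omega), if_neg (by omega), if_neg (by omega), if_neg (by omega), if_pos (by omega), if_pos (by omega)]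
  · have hlo : (790:Int) ≤ n := by have := hA 15 (by decide) (by decide); simpa [pvStarts] using this
    have hhi : n < (797:Int) := by have := hB 16 (by decide) (by decide); simpa [pvStarts] using this
    norm_num [pvScanGroups, pvGroups]
    rw [show PySem.List.pyGetD pvEnds 15 0 = (796:Int) from by decide]
    rw [if_neg (by omega), if_neg (by omega), if_neg (by omega), if_neg (by omega), if_neg (by omega), if_neg (by omega), if_neg (by omega), if_neg (by omega), if_neg (by omega), if_neg (by omega), if_neg (by omega), if_neg (by omega), if_neg (by omega), if_neg (by omega), if_neg (by omega), if_pos (by omega), if_pos (by omega)]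
  · have hlo : (797:Int) ≤ n := by have := hA 16 (by decide) (by decide); simpa [pvStarts] using this
    have hhi : n < (800:Int) := by have := hB 17 (by decide) (by decide); simpa [pvStarts] using this
    norm_num [pvScanGroups, pvGroups]
    rw [show PySem.List.pyGetD pvEnds 16 0 = (799:Int) from by decide]
    rw [if_neg (by omega), if_neg (by omega), if_neg (by omega), if_neg (by omega), if_neg (by omega), if_neg (by omega), if_neg (by omega), if_neg (by omega), if_neg (by omega), if_neg (by omega), if_neg (by omega), if_neg (by omega), if_neg (by omega), if_neg (by omega), if_neg (by omega), if_neg (by omega), if_pos (by omega), if_pos (by omega)]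
  · have hlo : (800:Int) ≤ n := by have := hA 17 (by decide) (by decide); simpa [pvStarts] using this
    norm_num [pvScanGroups, pvGroups]
    rw [show PySem.List.pyGetD pvEnds 17 0 = (999:Int) from by decide]
    by_cases hc : n ≤ (999:Int)
    · rw [if_neg (by omega), if_neg (by omega), if_neg (by omega), if_neg (by omega), if_neg (by omega), if_neg (by omega), if_neg (by omega), if_neg (by omega), if_neg (by omega), if_neg (by omega), if_neg (by omega), if_neg (by omega), if_neg (by omega), if_neg (by omega), if_neg (by omega), if_neg (by omega), if_neg (by omega), if_pos (by omega), if_pos hc]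
    · rw [if_neg (by omega), if_neg (by omega), if_neg (by omega), if_neg (by omega), if_neg (by omega), if_neg (by omega), if_neg (by omega), if_neg (by omega), if_neg (by omega), if_neg (by omega), if_neg (by omega), if_neg (by omega), if_neg (by omega), if_neg (by omega), if_neg (by omega), if_neg (by omega), if_neg (by omega), if_neg (by omega), if_neg hc]

-- a non-empty string: first character facts shared by the two ports
theorem pv_first_char (s : String) (c : Char) (rest : List Char) (hs : s.toList = c :: rest) :
    PySem.Str.pyGet? s 0 = some c ∧
    PySem.Str.strIsalpha (PySem.Str.slice s none (some 1)) = PySem.Chars.isalpha c := by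
  constructor
  · simp [pysem, hs]
  · simp [pysem, hs, PySem.Chars.strIsalpha]

-- ===== VERDICT (by name: the statement is the Claim_ definition above) =====
set_option maxHeartbeats 1000000 in
theorem get_multigroup_label_spec : Claim_equal_get_multigroup_label := by
  intro s _hdom hpre
  unfold Spec_get_multigroup_label get_multigroup_label get_multigroup_label_alt
  obtain ⟨c, rest, hs⟩ : ∃ c rest, s.toList = c :: rest := by
    cases h : s.toList with
    | nil =>
        have : s = "" := by
          have h2 := congrArg String.ofList h
          simpa using h2
        exact absurd this hpre
    | cons c rest => exact ⟨c, rest, rfl⟩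
  obtain ⟨h0, h1⟩ := pv_first_char s c rest hs
  rw [h0, h1]
  by_cases hc : PySem.Chars.isalpha c = true
  · simp [hc]
  · simp only [Bool.not_eq_true] at hc
    simp only [hc, if_neg Bool.false_ne_true]
    cases hof : PySem.Int.ofStr? (PySem.Str.slice s none (some 3)) with
    | none => rfl
    | some n => exact pvScan_eq_probe n
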